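-- pv_equiv track=rewrite | github.com/almlab/SmileTrain | seq_table.py | table_to_samples
-- ===== SOURCE A (Python) =====
-- def table_to_samples(table):
--     '''get sorted list of sample names'''
--     samples = []
--     for seq in table:
--         for sample in table[seq]:
--             if sample not in samples:
--                 samples.append(sample)
--
--     samples = sorted(samples)
--     return samples
-- ===== SOURCE B (Python) =====
-- def table_to_samples(table):
--     '''get sorted list of sample names'''
--     names = sorted(sample for samples in table.values() for sample in samples)
--     return names[:1] + [b for a, b in zip(names, names[1:]) if a != b]
-- ===== Notes on version B (the rewrite author's own statement) =====
-- stated objective: faster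
-- what changed: Replaces A's nested loops with key-lookup and an O(n) 'not in' membership dedup by a comprehension flatten over table.values(), one sorted() call, and a zip(names, names[1:]) pairwise comparison that drops adjacent duplicates.
import Mathlib
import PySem

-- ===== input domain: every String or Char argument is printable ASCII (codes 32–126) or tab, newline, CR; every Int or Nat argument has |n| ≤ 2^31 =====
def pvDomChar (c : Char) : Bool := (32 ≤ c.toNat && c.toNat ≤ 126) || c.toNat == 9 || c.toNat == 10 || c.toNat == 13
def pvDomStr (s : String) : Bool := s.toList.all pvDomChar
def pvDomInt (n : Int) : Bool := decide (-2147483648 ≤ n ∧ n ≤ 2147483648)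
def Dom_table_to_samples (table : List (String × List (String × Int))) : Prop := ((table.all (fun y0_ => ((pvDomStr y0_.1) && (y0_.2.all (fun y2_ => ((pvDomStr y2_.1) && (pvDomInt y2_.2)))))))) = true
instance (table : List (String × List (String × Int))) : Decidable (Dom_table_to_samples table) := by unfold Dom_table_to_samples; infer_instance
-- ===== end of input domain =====

-- B replaces A's quadratic membership-scan dedup by values()-flatten, one sort, and a zip-pairwise adjacent-duplicate drop (return value only).

-- ===== PORT A =====
def table_to_samples (table : List (String × List (String × Int))) : List String :=
  let samples := table.foldl
    (fun samples kv =>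
      (PySem.Dict.getD (PySem.Dict.mk table) kv.1 []).foldl
        (fun samples sp => if sp.1 ∈ samples then samples else samples ++ [sp.1])
        samples)
    []
  PySem.List.sorted samples (fun x => x) false

-- ===== PORT B =====
-- names[1:] is ported as PySem.List.slice names (some 1) none; names[:1] as slice names none (some 1).
def table_to_samples_alt (table : List (String × List (String × Int))) : List String :=
  let names := PySem.List.sorted
    ((PySem.Dict.values (PySem.Dict.mk table)).flatMap (fun v => v.map Prod.fst))
    (fun x => x) false
  PySem.List.slice names none (some 1) ++
    (names.zip (PySem.List.slice names (some 1) none)).filterMap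
      (fun p => if p.1 ≠ p.2 then some p.2 else none)

-- ===== PRECONDITION & SPEC =====
-- Pre_ excludes association lists with duplicate outer keys: those do not represent a Python dict
-- (a Python dict always has distinct keys, so no Python input is excluded).
def Pre_table_to_samples (table : List (String × List (String × Int))) : Prop :=
  (table.map Prod.fst).Nodup
instance (table : List (String × List (String × Int))) : Decidable (Pre_table_to_samples table) := by unfold Pre_table_to_samples; infer_instance
def pvWitness_table_to_samples : (List (String × List (String × Int))) :=
  [("s1", [("B", 2), ("A", 1)]), ("s2", [("A", 3)])]
def Spec_table_to_samples (table : List (String × List (String × Int))) (out : List String) : Prop := out = table_to_samples_alt table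
instance (table : List (String × List (String × Int))) (out : List String) : Decidable (Spec_table_to_samples table out) := by unfold Spec_table_to_samples; infer_instance

-- ===== CLAIM (what is proved, stated in full; the proofs are below) =====
def Claim_equal_table_to_samples : Prop := ∀ (table : List (String × List (String × Int))), Dom_table_to_samples table → Pre_table_to_samples table → Spec_table_to_samples table (table_to_samples table)

-- ===== LEMMAS AND PROOFS =====

-- under Nodup keys, table[seq] is kv's own value
theorem pv_lookup_eq {table : List (String × List (String × Int))}
    {kv : String × List (String × Int)} (hmem : kv ∈ table)
    (hnd : (table.map Prod.fst).Nodup) :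
    PySem.Dict.getD (PySem.Dict.mk table) kv.1 [] = kv.2 := by
  apply PySem.Dict.getD_of_mem_items
  · simpa [PySem.Dict.items] using hmem
  · simpa [PySem.Dict.keys, PySem.Dict.items] using hnd

def pvFlat (table : List (String × List (String × Int))) : List String :=
  table.flatMap (fun kv => kv.2.map Prod.fst)

-- nested fold over per-key lists = fold over the flattened list
theorem pv_foldl_flatMap {α β γ : Type} (g : β → List α) (f : γ → α → γ) (l : List β) (init : γ) :
    l.foldl (fun acc kv => (g kv).foldl f acc) init = (l.flatMap g).foldl f init := by
  induction l generalizing init with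
  | nil => rfl
  | cons b t ih => simp only [List.foldl_cons, List.flatMap_cons, List.foldl_append, ih]

-- A's collection loop = ordered-dedup fold over the flat name list
theorem pv_A_pre (table : List (String × List (String × Int)))
    (hnd : (table.map Prod.fst).Nodup) :
    table.foldl
      (fun samples kv =>
        (PySem.Dict.getD (PySem.Dict.mk table) kv.1 []).foldl
          (fun samples sp => if sp.1 ∈ samples then samples else samples ++ [sp.1]) samples) []
    = (pvFlat table).foldl (fun samples s => if s ∈ samples then samples else samples ++ [s]) [] := by
  rw [PySem.List.foldl_congr_mem'
    (g := fun acc kv => (kv.2.map Prod.fst).foldl (fun samples s => if s ∈ samples then samples else samples ++ [s]) acc)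
    (h := fun kv hkv acc => by rw [pv_lookup_eq hkv hnd]; simp [List.foldl_map])]
  exact pv_foldl_flatMap _ _ _ _

-- B's flattened name list = pvFlat (Dict.mk is a constructor: values (mk table) = table.map Prod.snd)
theorem pv_B_flat (table : List (String × List (String × Int))) :
    (PySem.Dict.values (PySem.Dict.mk table)).flatMap (fun v => v.map Prod.fst) = pvFlat table := by
  simp [PySem.Dict.values, pvFlat, List.flatMap_map]

-- membership / nodup of the dedup fold
theorem pv_mem_dedup (l : List String) (acc : List String) (x : String) :
    x ∈ l.foldl (fun samples s => if s ∈ samples then samples else samples ++ [s]) acc ↔ x ∈ acc ∨ x ∈ l := by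
  induction l generalizing acc with
  | nil => simp
  | cons a t ih =>
    simp only [List.foldl_cons]
    by_cases h : a ∈ acc
    · simp only [if_pos h, ih, List.mem_cons]
      constructor
      · tauto
      · rintro (hx | rfl | hx)
        exacts [Or.inl hx, Or.inl h, Or.inr hx]
    · simp only [if_neg h, ih, List.mem_append, List.mem_cons]
      tauto

theorem pv_nodup_dedup (l : List String) (acc : List String) (h : acc.Nodup) :
    (l.foldl (fun samples s => if s ∈ samples then samples else samples ++ [s]) acc).Nodup := by
  induction l generalizing acc with
  | nil => exact h
  | cons a t ih =>
    simp only [List.foldl_cons]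
    by_cases ha : a ∈ acc
    · simpa [ha] using ih acc h
    · have : (acc ++ [a]).Nodup := by
        refine (List.nodup_append).mpr ⟨h, List.nodup_singleton a, ?_⟩
        intro y hy b hb
        rw [List.mem_singleton] at hb
        subst hb
        exact fun hya => ha (hya ▸ hy)
      simpa [ha] using ih _ this

-- adjacent-duplicate removal, recursive characterisation
def pvAdj (a : String) : List String → List String
  | [] => [a]
  | x :: xs => if a = x then pvAdj a xs else a :: pvAdj x xs

-- B's zip/filterMap pass computes pvAdj
theorem pv_zip_adj (xs : List String) (x : String) :
    x :: ((x :: xs).zip xs).filterMap (fun p => if p.1 ≠ p.2 then some p.2 else none)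
    = pvAdj x xs := by
  induction xs generalizing x with
  | nil => rfl
  | cons y ys ih =>
    by_cases hxy : x = y
    · subst hxy
      simp only [List.zip_cons_cons, List.filterMap_cons, ne_eq, not_true_eq_false, if_false]
      rw [show pvAdj x (x :: ys) = pvAdj x ys by simp [pvAdj], ← ih]
    · simp only [List.zip_cons_cons, List.filterMap_cons, ne_eq, hxy, not_false_eq_true, if_true]
      rw [show pvAdj x (y :: ys) = x :: pvAdj y ys by simp [pvAdj, hxy], ← ih]

theorem pv_mem_adj (l : List String) (a x : String) :
    x ∈ pvAdj a l ↔ x = a ∨ x ∈ l := by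
  induction l generalizing a with
  | nil => simp [pvAdj]
  | cons b t ih =>
    by_cases hab : a = b
    · subst hab
      rw [show pvAdj a (a :: t) = pvAdj a t by simp [pvAdj]]
      rw [ih]
      simp only [List.mem_cons]
      tauto
    · simp only [pvAdj, if_neg hab, List.mem_cons, ih]

theorem pv_pairwise_adj (l : List String) (a : String)
    (h : (a :: l).Pairwise (· ≤ ·)) : (pvAdj a l).Pairwise (· < ·) := by
  induction l generalizing a with
  | nil => simp [pvAdj]
  | cons x xs ih =>
    rcases List.pairwise_cons.mp h with ⟨ha, hxl⟩
    by_cases hax : a = x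
    · subst hax
      rw [show pvAdj a (a :: xs) = pvAdj a xs by simp [pvAdj]]
      exact ih a (by
        rcases List.pairwise_cons.mp hxl with ⟨hx, hxs⟩
        exact List.pairwise_cons.mpr ⟨fun y hy => ha y (List.mem_cons_of_mem _ hy), hxs⟩)
    · simp only [pvAdj, if_neg hax]
      refine List.pairwise_cons.mpr ⟨?_, ih x hxl⟩
      intro y hy
      rcases (pv_mem_adj xs x y).mp hy with rfl | hy'
      · exact lt_of_le_of_ne (ha y (List.mem_cons_self)) hax
      · have hax' : a < x := lt_of_le_of_ne (ha x List.mem_cons_self) hax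
        rcases List.pairwise_cons.mp hxl with ⟨hx, _⟩
        exact lt_of_lt_of_le hax' (hx y hy')

-- ===== VERDICT (by name: the statement is the Claim_ definition above) =====
theorem table_to_samples_spec : Claim_equal_table_to_samples := by
  intro table _hdom hpre
  show PySem.List.sorted
      (table.foldl
        (fun samples kv =>
          (PySem.Dict.getD (PySem.Dict.mk table) kv.1 []).foldl
            (fun samples sp => if sp.1 ∈ samples then samples else samples ++ [sp.1]) samples) [])
      (fun x => x) false
    = table_to_samples_alt table
  unfold table_to_samples_alt
  rw [pv_A_pre table hpre, pv_B_flat]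
  rcases hss : PySem.List.sorted (pvFlat table) (fun x => x) false with _ | ⟨x, xs⟩
  · have hp := PySem.List.sorted_perm (pvFlat table) (fun x => x) false
    rw [hss] at hp
    rw [hp.symm.eq_nil]
    rfl
  · have hperm : (x :: xs).Perm (pvFlat table) := hss ▸ PySem.List.sorted_perm (pvFlat table) (fun x => x) false
    have hpw : (x :: xs).Pairwise (· ≤ ·) := by
      have := PySem.List.sorted_pairwise (pvFlat table) (fun x => x)
      rw [hss] at this
      exact this
    have hB : PySem.List.slice (x :: xs) none (some 1) ++
        ((x :: xs).zip (PySem.List.slice (x :: xs) (some 1) none)).filterMap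
          (fun p => if p.1 ≠ p.2 then some p.2 else none)
        = pvAdj x xs := by
      rw [PySem.List.slice_from_one]
      rw [show PySem.List.slice (x :: xs) none (some 1) = [x] from rfl]
      simpa using pv_zip_adj xs x
    rw [hB]
    apply PySem.List.sorted_eq_of_perm_of_pairwise_lt
    · refine (List.perm_ext_iff_of_nodup ?_ ?_).mpr ?_
      · exact List.Pairwise.imp (fun h => ne_of_lt h) (pv_pairwise_adj xs x hpw)
      · exact pv_nodup_dedup (pvFlat table) [] (by simp)
      · intro y
        rw [pv_mem_adj, pv_mem_dedup]
        have hy : y ∈ x :: xs ↔ y ∈ pvFlat table := hperm.mem_iff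
        simp only [List.mem_cons] at hy
        simp only [List.not_mem_nil, false_or]
        exact hy
    · exact pv_pairwise_adj xs x hpw
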